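-- pv_equiv track=rewrite | github.com/pypi-data/pypi-mirror-40 | packages/jivi/jivi-0.0.10.tar.gz/jivi-0.0.10/jivi/oe/Window.py | find_assign
-- ===== SOURCE A (Python) =====
-- def find_assign(a):
-- 	for i,b in enumerate(a):
-- 		if b == 'assign':
-- 			t = {}
-- 			n = i
-- 			n += 1
-- 			while (n + 2) < len(a):
-- 				t[a[n]] = a[n+2]
-- 				n += 3
-- 			return t
-- ===== SOURCE B (Python) =====
-- def find_assign(a):
-- 	found = False
-- 	phase = 0
-- 	key = None
-- 	pairs = {}
-- 	for b in a:
-- 		if not found: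
-- 			if b == 'assign':
-- 				found = True
-- 		elif phase == 0:
-- 			key = b
-- 			phase = 1
-- 		elif phase == 1:
-- 			phase = 2
-- 		else:
-- 			pairs[key] = b
-- 			phase = 0
-- 	return pairs if found else None
-- ===== Notes on version B (the rewrite author's own statement) =====
-- stated objective: alternative
-- what changed: B replaces A's two-stage search-then-stride-3 indexed while loop by a single pass over the whole list with a 3-phase state machine accumulator (found flag, phase counter, pending key), with no indexing or slicing at all.
import Mathlib
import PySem

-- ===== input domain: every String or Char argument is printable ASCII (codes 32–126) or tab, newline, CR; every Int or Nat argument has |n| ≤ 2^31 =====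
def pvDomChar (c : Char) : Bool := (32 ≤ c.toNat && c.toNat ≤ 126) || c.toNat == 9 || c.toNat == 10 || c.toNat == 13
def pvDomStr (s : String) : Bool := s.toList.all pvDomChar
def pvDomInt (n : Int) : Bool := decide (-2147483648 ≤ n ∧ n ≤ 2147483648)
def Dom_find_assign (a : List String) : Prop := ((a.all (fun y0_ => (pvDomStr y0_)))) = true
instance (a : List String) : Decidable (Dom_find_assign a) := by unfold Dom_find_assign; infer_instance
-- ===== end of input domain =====

-- B replaces A's search-then-stride-3 indexed loop by a single pass over the list
-- with a 3-phase state-machine accumulator (alternative decomposition; same cost).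


-- ===== PORT A =====
-- the 'while (n + 2) < len(a): t[a[n]] = a[n+2]; n += 3' loop (indices always in range)
def pvWhileA (a : List String) (t : PySem.Dict String String) (n : Nat) :
    PySem.Dict String String :=
  if n + 2 < a.length then
    pvWhileA a (t.insert (a.getD n "") (a.getD (n + 2) "")) (n + 3)
  else t
termination_by a.length - n

-- the 'for i, b in enumerate(a)' loop; falls through to None
def pvForA (a : List String) : List (Int × String) → Option (List (String × String))
  | [] => none
  | (i, b) :: rest =>
      if b == "assign" then some (pvWhileA a PySem.Dict.empty (i.toNat + 1)).items
      else pvForA a rest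

def find_assign (a : List String) : Option (List (String × String)) :=
  pvForA a (PySem.List.enumerate a 0)

-- ===== PORT B =====
-- one step of B's loop body on the state (found, phase, key, pairs);
-- Python's initial 'key = None' is unreachable in the phase-2 branch, ported as ""
def pvStepB (st : Bool × Nat × String × PySem.Dict String String) (b : String) :
    Bool × Nat × String × PySem.Dict String String :=
  match st with
  | (found, phase, key, pairs) =>
      if !found then
        if b == "assign" then (true, phase, key, pairs) else (found, phase, key, pairs)
      else if phase == 0 then (found, 1, b, pairs)
      else if phase == 1 then (found, 2, key, pairs)
      else (found, 0, key, pairs.insert key b)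

def find_assign_alt (a : List String) : Option (List (String × String)) :=
  let r := a.foldl pvStepB (false, 0, "", PySem.Dict.empty)
  if r.1 then some r.2.2.2.items else none

-- ===== PRECONDITION & SPEC =====
def Spec_find_assign (a : List String) (out : Option (List (String × String))) : Prop := out = find_assign_alt a
instance (a : List String) (out : Option (List (String × String))) : Decidable (Spec_find_assign a out) := by unfold Spec_find_assign; infer_instance

-- ===== CLAIM (what is proved, stated in full; the proofs are below) =====
def Claim_equal_find_assign : Prop := ∀ (a : List String), Dom_find_assign a → Spec_find_assign a (find_assign a)

-- ===== LEMMAS AND PROOFS =====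

-- proof-side helper: the (key, value) pairs read three apart, as a list
def pvTriples : List String → List (String × String)
  | k :: _ :: v :: rest => (k, v) :: pvTriples rest
  | _ => []

theorem pvTriples_nil_of_short (l : List String) (h : l.length < 3) : pvTriples l = [] := by
  match l with
  | [] => rfl
  | [_] => rfl
  | [_, _] => rfl
  | _ :: _ :: _ :: _ => simp only [List.length_cons] at h; omega

theorem pvWhileA_eq (a : List String) (n : Nat) (t : PySem.Dict String String) :
    pvWhileA a t n = (pvTriples (a.drop n)).foldl (fun d p => d.insert p.1 p.2) t := by
  have H : ∀ (m n : Nat), a.length - n ≤ m → ∀ t,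
      pvWhileA a t n = (pvTriples (a.drop n)).foldl (fun d p => d.insert p.1 p.2) t := by
    intro m
    induction m with
    | zero =>
        intro n hm t
        rw [pvWhileA, if_neg (by omega)]
        rw [pvTriples_nil_of_short _ (by simp only [List.length_drop]; omega)]
        rfl
    | succ m ih =>
        intro n hm t
        by_cases h : n + 2 < a.length
        · rw [pvWhileA, if_pos h]
          have hd : a.drop n = a.getD n "" :: a.getD (n + 1) "" :: a.getD (n + 2) "" :: a.drop (n + 3) := by
            have h0 : n < a.length := by omega
            have h1 : n + 1 < a.length := by omega
            have h2 : n + 2 < a.length := by omega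
            rw [List.drop_eq_getElem_cons h0, List.drop_eq_getElem_cons h1, List.drop_eq_getElem_cons h2]
            simp [List.getD, h0, h1, h2]
          rw [hd, pvTriples, ih (n + 3) (by omega)]
          rfl
        · rw [pvWhileA, if_neg h]
          rw [pvTriples_nil_of_short _ (by simp only [List.length_drop]; omega)]
          rfl
  exact H (a.length - n) n (Nat.le_refl _) t

-- the found phase of B: a fold from (true, 0, k, d) collects exactly the stride-3 pairs
theorem pvFoldB_found (l : List String) (k : String) (d : PySem.Dict String String) :
    l.foldl pvStepB (true, 0, k, d) =
      (true, (l.foldl pvStepB (true, 0, k, d)).2.1,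
       (l.foldl pvStepB (true, 0, k, d)).2.2.1,
       (pvTriples l).foldl (fun d p => d.insert p.1 p.2) d) := by
  induction l using pvTriples.induct generalizing k d with
  | case1 k' m v rest ih =>
      simp only [List.foldl_cons, pvStepB, pvTriples]
      simpa using ih k' (d.insert k' v)
  | case2 l hshape =>
      match l, hshape with
      | [], _ => rfl
      | [_], _ => rfl
      | [_, _], _ => rfl
      | x :: y :: z :: r, h => exact (h x y z r rfl).elim

-- the main bridge: A's for-loop over a suffix equals B's fold over that suffix
theorem pvBridge (a : List String) (l : List String) (s : Nat) (hl : a.drop s = l) :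
    pvForA a (PySem.List.enumerate l (s : Int)) =
      (if (l.foldl pvStepB (false, 0, "", PySem.Dict.empty)).1 then
        some (l.foldl pvStepB (false, 0, "", PySem.Dict.empty)).2.2.2.items
      else none) := by
  induction l generalizing s with
  | nil => simp [PySem.List.enumerate_nil, pvForA]
  | cons x xs ih =>
      rw [PySem.List.enumerate_cons, pvForA]
      have hxs : a.drop (s + 1) = xs := by
        have := congrArg (List.drop 1) hl
        simpa [List.drop_drop, Nat.add_comm] using this
      by_cases hx : x = "assign"
      · subst hx
        simp only [beq_self_eq_true, if_pos]
        have hfold := pvFoldB_found xs "" PySem.Dict.empty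
        simp only [List.foldl_cons, pvStepB, Bool.not_false, if_pos, beq_self_eq_true]
        rw [hfold]
        simp only [if_pos]
        have : (s : Int).toNat + 1 = s + 1 := by simp
        rw [this, pvWhileA_eq, hxs]
      · rw [if_neg (by simp [hx])]
        have : ((s : Int) + 1) = ((s + 1 : Nat) : Int) := by push_cast; ring
        rw [this, ih (s + 1) hxs]
        simp only [List.foldl_cons, pvStepB, Bool.not_false, if_true, beq_iff_eq, hx, if_false]

-- ===== VERDICT (by name: the statement is the Claim_ definition above) =====
theorem find_assign_spec : Claim_equal_find_assign := by
  intro a _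
  unfold Spec_find_assign find_assign find_assign_alt
  have h := pvBridge a a 0 (by simp)
  rw [Nat.cast_zero] at h
  exact h
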